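-- pv_equiv track=rewrite | github.com/RandyHaddad/Berghain | images-generation/images_generation/combos.py | enumerate_bit_combos
-- ===== SOURCE A (Python) =====
-- from typing import List, Sequence, Tuple, Optional, Set, Dict
--
-- def enumerate_bit_combos(n: int, required_indices: Optional[List[int]] = None) -> List[List[int]]:
--     """Generate all possible bit combinations, with certain positions forced to 1."""
--     if n <= 0:
--         return [[]]
--
--     required_indices = required_indices or []
--     combos: List[List[int]] = []
--     total = 1 << n
--
--     for i in range(total):
--         bits = [(i >> k) & 1 for k in range(n)]
--
--         # Force required attributes to be True (1)
--         for idx in required_indices: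
--             if 0 <= idx < len(bits):
--                 bits[idx] = 1
--
--         combos.append(bits)
--     return combos
-- ===== SOURCE B (Python) =====
-- from typing import List, Optional
--
-- def enumerate_bit_combos(n: int, required_indices: Optional[List[int]] = None) -> List[List[int]]:
--     """Iterative doubling: extend every existing row by the next bit, baking the
--     forced positions in during construction instead of patching each row afterwards."""
--     forced = {idx for idx in (required_indices or []) if 0 <= idx < n}
--     combos: List[List[int]] = [[]]
--     for k in range(n):
--         low = 1 if k in forced else 0
--         combos = [c + [low] for c in combos] + [c + [1] for c in combos]
--     return combos
-- ===== Notes on version B (the rewrite author's own statement) =====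
-- stated objective: alternative
-- what changed: Replaces the 2^n-iteration loop that bit-extracts each row arithmetically and then patches forced positions per row with an iterative doubling construction (combos = [c+[low] for c in combos] + [c+[1] for c in combos]) that bakes forced positions in once per bit position, eliminating the per-row forcing pass.
import Mathlib
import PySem

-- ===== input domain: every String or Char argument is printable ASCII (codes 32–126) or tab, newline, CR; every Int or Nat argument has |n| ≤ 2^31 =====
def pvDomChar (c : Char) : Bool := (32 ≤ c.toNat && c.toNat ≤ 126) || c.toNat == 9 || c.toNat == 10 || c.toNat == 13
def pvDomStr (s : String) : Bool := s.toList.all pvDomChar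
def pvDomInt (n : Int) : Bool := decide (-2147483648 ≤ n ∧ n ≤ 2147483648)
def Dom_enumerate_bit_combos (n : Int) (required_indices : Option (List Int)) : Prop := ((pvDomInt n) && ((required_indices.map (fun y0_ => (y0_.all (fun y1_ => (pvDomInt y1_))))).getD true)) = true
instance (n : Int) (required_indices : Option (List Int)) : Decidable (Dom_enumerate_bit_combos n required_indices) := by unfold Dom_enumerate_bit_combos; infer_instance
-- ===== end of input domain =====

-- B replaces A's per-row arithmetic bit extraction plus per-row forcing pass by an
-- iterative doubling construction that bakes the forced positions in once per bit
-- position (objective: alternative algorithm, same output).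

-- ===== PORT A =====
def enumerate_bit_combos (n : Int) (required_indices : Option (List Int)) : List (List Int) :=
  if n ≤ 0 then [[]]
  else
    let req := required_indices.getD []       -- required_indices or []
    let total : Int := 1 <<< n.toNat          -- 1 << n  (n > 0 here)
    (PySem.List.pyRange 0 total 1).foldl (fun combos i =>
      let bits := (PySem.List.pyRange 0 n 1).map (fun k => PySem.Int.band (i >>> k.toNat) 1)
      let bits := req.foldl (fun bs idx =>
        if 0 ≤ idx ∧ idx < (bs.length : Int) then PySem.List.pySetD bs idx 1 else bs) bits
      combos ++ [bits]) []

-- ===== PORT B =====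
def enumerate_bit_combos_alt (n : Int) (required_indices : Option (List Int)) : List (List Int) :=
  let forced : PySem.Set Int :=
    PySem.Set.ofList ((required_indices.getD []).filter (fun idx => decide (0 ≤ idx) && decide (idx < n)))
  (PySem.List.pyRange 0 n 1).foldl (fun combos k =>
    let low : Int := if PySem.Set.contains forced k then 1 else 0
    combos.map (· ++ [low]) ++ combos.map (· ++ [1])) [[]]

-- ===== PRECONDITION & SPEC =====
def Spec_enumerate_bit_combos (n : Int) (required_indices : Option (List Int)) (out : List (List Int)) : Prop := out = enumerate_bit_combos_alt n required_indices
instance (n : Int) (required_indices : Option (List Int)) (out : List (List Int)) : Decidable (Spec_enumerate_bit_combos n required_indices out) := by unfold Spec_enumerate_bit_combos; infer_instance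

-- ===== CLAIM (what is proved, stated in full; the proofs are below) =====
def Claim_equal_enumerate_bit_combos : Prop := ∀ (n : Int) (required_indices : Option (List Int)), Dom_enumerate_bit_combos n required_indices → Spec_enumerate_bit_combos n required_indices (enumerate_bit_combos n required_indices)

-- ===== LEMMAS AND PROOFS =====

-- the k-th little-endian bit of i, as an Int
def pvBit (i k : Nat) : Int := ((i >>> k) % 2 : Nat)

-- the row both programs produce for index i with n bits and forced predicate f
def pvRow (f : Nat → Bool) (m i : Nat) : List Int :=
  (List.range m).map (fun k => if f k then 1 else pvBit i k)

-- A's forcing pass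
def pvForce (req : List Int) (bs : List Int) : List Int :=
  req.foldl (fun bs idx =>
    if 0 ≤ idx ∧ idx < (bs.length : Int) then PySem.List.pySetD bs idx 1 else bs) bs

lemma pvForce_length (req bs) : (pvForce req bs).length = bs.length := by
  induction req generalizing bs with
  | nil => rfl
  | cons idx rest ih =>
    show (pvForce rest (if 0 ≤ idx ∧ idx < (bs.length : Int) then PySem.List.pySetD bs idx 1 else bs)).length = bs.length
    rw [ih]
    split_ifs with h
    · exact PySem.List.length_pySetD _ _ _
    · rfl

lemma pvForce_getElem? (req bs) (k : Nat) (hk : k < bs.length) :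
    (pvForce req bs)[k]? = if ((k : Int) ∈ req) then some 1 else bs[k]? := by
  induction req generalizing bs with
  | nil => simp [pvForce]
  | cons idx rest ih =>
    show (pvForce rest (if 0 ≤ idx ∧ idx < (bs.length : Int) then PySem.List.pySetD bs idx 1 else bs))[k]? = _
    by_cases hv : 0 ≤ idx ∧ idx < (bs.length : Int)
    · rw [if_pos hv, PySem.List.pySetD_of_nonneg _ _ hv.1,
        ih _ (by simpa using hk), List.getElem?_set]
      by_cases hm : (k : Int) ∈ rest
      · simp [hm, List.mem_cons]
      · by_cases he : idx = (k : Int)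
        · have ht : idx.toNat = k := by omega
          simp [ht, hk, List.mem_cons, he.symm]
        · have ht : idx.toNat ≠ k := by omega
          simp only [List.mem_cons, hm, or_false, ht, if_false]
          rw [if_neg (fun h : (k:Int) = idx => he h.symm)]
    · rw [if_neg hv, ih _ hk]
      have he : idx ≠ (k : Int) := by omega
      by_cases hm : (k : Int) ∈ rest
      · simp [hm, List.mem_cons]
      · simp only [List.mem_cons, hm, or_false, if_false]
        rw [if_neg (fun h : (k:Int) = idx => he h.symm)]

-- A's row i equals pvRow
lemma pvA_row (req : List Int) (m i : Nat) :
    pvForce req ((List.range m).map (fun k => pvBit i k))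
      = pvRow (fun k => decide ((k : Int) ∈ req)) m i := by
  apply List.ext_getElem?
  intro k
  by_cases hk : k < m
  · rw [pvForce_getElem? _ _ k (by simpa using hk)]
    simp only [pvRow, List.getElem?_map, List.getElem?_range hk]
    by_cases hm : (k : Int) ∈ req <;> simp [hm]
  · have h2 : (pvForce req ((List.range m).map (fun k => pvBit i k))).length = m := by
      rw [pvForce_length]; simp
    rw [List.getElem?_eq_none (by omega), List.getElem?_eq_none (by simp [pvRow]; omega)]

-- bits above the range: pvBit i m = 0 for i < 2^m
lemma pvBit_high (m i : Nat) (h : i < 2 ^ m) : pvBit i m = 0 := by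
  simp [pvBit, Nat.shiftRight_eq_div_pow, Nat.div_eq_of_lt h]

lemma pvBit_add_pow_low (m i k : Nat) (hk : k < m) : pvBit (2 ^ m + i) k = pvBit i k := by
  simp only [pvBit, Nat.shiftRight_eq_div_pow]
  have hsplit : 2 ^ m = 2 ^ k * 2 ^ (m - k) := by
    rw [← pow_add]; congr 1; omega
  rw [hsplit, Nat.mul_add_div (Nat.two_pow_pos k)]
  have hev : 2 ^ (m - k) % 2 = 0 := by
    have : (2:Nat) ∣ 2 ^ (m - k) := dvd_pow_self 2 (by omega)
    omega
  congr 1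
  omega

lemma pvBit_add_pow_high (m i : Nat) (h : i < 2 ^ m) : pvBit (2 ^ m + i) m = 1 := by
  simp only [pvBit, Nat.shiftRight_eq_div_pow]
  rw [Nat.add_div_left i (Nat.two_pow_pos m), Nat.div_eq_of_lt h]
  decide

lemma pvRow_succ_low (f : Nat → Bool) (m i : Nat) (h : i < 2 ^ m) :
    pvRow f (m + 1) i = pvRow f m i ++ [if f m then 1 else 0] := by
  simp only [pvRow, List.range_succ, List.map_append, List.map_cons, List.map_nil]
  rw [pvBit_high m i h]

lemma pvRow_succ_high (f : Nat → Bool) (m i : Nat) (h : i < 2 ^ m) :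
    pvRow f (m + 1) (2 ^ m + i) = pvRow f m i ++ [1] := by
  simp only [pvRow, List.range_succ, List.map_append, List.map_cons, List.map_nil]
  rw [pvBit_add_pow_high m i h]
  congr 1
  · exact List.map_congr_left (fun k hk => by
      rw [pvBit_add_pow_low m i k (List.mem_range.mp hk)])
  · simp

-- B's doubling fold equals the table of rows
lemma pvB_fold (f : Nat → Bool) (m : Nat) :
    (List.range m).foldl (fun combos k =>
        combos.map (· ++ [if f k then (1:Int) else 0]) ++ combos.map (· ++ [1])) [[]]
      = (List.range (2 ^ m)).map (pvRow f m) := by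
  induction m with
  | zero => simp [pvRow]
  | succ m ih =>
    rw [List.range_succ, List.foldl_append, ih]
    have hsum : 2 ^ (m + 1) = 2 ^ m + 2 ^ m := by ring
    rw [hsum, List.range_add]
    simp only [List.foldl_cons, List.foldl_nil, List.map_map, List.map_append]
    congr 1
    · exact List.map_congr_left (fun i hi => by
        simp only [Function.comp_apply]
        exact (pvRow_succ_low f m i (List.mem_range.mp hi)).symm)
    · exact List.map_congr_left (fun i hi => by
        simp only [Function.comp_apply]
        exact (pvRow_succ_high f m i (List.mem_range.mp hi)).symm)

-- A's inner comprehension computes the raw bit row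
lemma pvA_bits (i' : Int) (m : Nat) (i : Nat) (hi : i' = (i : Int)) :
    ((List.range m).map (fun k : Nat => (k : Int))).map
        (fun (k : Int) => PySem.Int.band (i' >>> k.toNat) 1)
      = (List.range m).map (fun k => pvBit i k) := by
  subst hi
  rw [List.map_map]
  refine List.map_congr_left (fun k _ => ?_)
  simp only [Function.comp_apply, Int.toNat_natCast]
  rw [PySem.Int.band_one, PySem.Int.mod_eq_emod_of_pos (by norm_num : (0:Int) < 2)]
  unfold pvBit
  simp

-- A, for positive n, as a table of rows
lemma pvA_eq (n : Int) (r : Option (List Int)) (hn : 0 < n) :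
    enumerate_bit_combos n r
      = (List.range (2 ^ n.toNat)).map
          (pvRow (fun k => decide ((k : Int) ∈ r.getD [])) n.toNat) := by
  unfold enumerate_bit_combos
  rw [if_neg (by omega)]
  have htot : (1 <<< n.toNat : Nat) = 2 ^ n.toNat := Nat.one_shiftLeft _
  rw [htot]
  simp only [PySem.List.pyRange_zero, Int.toNat_natCast, List.foldl_map,
    PySem.List.foldl_append_singleton_eq_map, List.nil_append]
  refine List.map_congr_left (fun i _ => ?_)
  rw [pvA_bits _ n.toNat i rfl]
  exact pvA_row (r.getD []) n.toNat i

-- B as a table of rows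
lemma pvB_eq (n : Int) (r : Option (List Int)) :
    enumerate_bit_combos_alt n r
      = (List.range (2 ^ n.toNat)).map
          (pvRow (fun k => PySem.Set.contains
            (PySem.Set.ofList ((r.getD []).filter (fun idx => decide (0 ≤ idx) && decide (idx < n))))
            (k : Int)) n.toNat) := by
  unfold enumerate_bit_combos_alt
  rw [← pvB_fold, PySem.List.pyRange_zero, List.foldl_map]

-- ===== VERDICT (by name: the statement is the Claim_ definition above) =====
theorem enumerate_bit_combos_spec : Claim_equal_enumerate_bit_combos := by
  intro n r _
  unfold Spec_enumerate_bit_combos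
  by_cases hn : n ≤ 0
  · unfold enumerate_bit_combos enumerate_bit_combos_alt
    rw [if_pos hn, PySem.List.pyRange_one_eq_nil hn]
    rfl
  · rw [pvA_eq n r (by omega), pvB_eq n r]
    refine List.map_congr_left (fun i _ => ?_)
    unfold pvRow
    refine List.map_congr_left (fun k hk => ?_)
    have hk' : (k : Int) < n := by
      have := List.mem_range.mp hk; omega
    have hcond : (decide ((k : Int) ∈ r.getD [])) = PySem.Set.contains
        (PySem.Set.ofList ((r.getD []).filter (fun idx => decide (0 ≤ idx) && decide (idx < n))))
        (k : Int) := by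
      simp [PySem.Set.contains, PySem.Set.mem_ofList, List.mem_filter, hk']
    beta_reduce
    rw [hcond]
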